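-- pv_equiv track=rewrite | github.com/JackC177/PhyloAug | PhyloAug/src/find_neutral_from_MSA.py | compute_site_frequency
-- ===== SOURCE A (Python) =====
-- from collections import Counter
--
-- def compute_site_frequency(alignment):
--     seq_count = len(alignment)
--     freqs = []
--     for col in zip(*alignment):
--         count = Counter(col)
--         valid = sum(1 for base in col if base not in ["-", "N", "X"])
--         freqs.append(valid)
--     return freqs
-- ===== SOURCE B (Python) =====
-- def compute_site_frequency(alignment):
--     counts = None
--     for seq in alignment:
--         row = [0 if ch in ('-', 'N', 'X') else 1 for ch in seq]
--         counts = row if counts is None else [c + r for c, r in zip(counts, row)]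
--     return counts if counts is not None else []
-- ===== Notes on version B (the rewrite author's own statement) =====
-- stated objective: alternative
-- what changed: B makes one row-wise pass, elementwise-adding each sequence's 0/1 validity row into a running counts vector (zip truncates to the shortest row), instead of transposing the alignment into columns and counting each column separately.
import Mathlib
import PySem

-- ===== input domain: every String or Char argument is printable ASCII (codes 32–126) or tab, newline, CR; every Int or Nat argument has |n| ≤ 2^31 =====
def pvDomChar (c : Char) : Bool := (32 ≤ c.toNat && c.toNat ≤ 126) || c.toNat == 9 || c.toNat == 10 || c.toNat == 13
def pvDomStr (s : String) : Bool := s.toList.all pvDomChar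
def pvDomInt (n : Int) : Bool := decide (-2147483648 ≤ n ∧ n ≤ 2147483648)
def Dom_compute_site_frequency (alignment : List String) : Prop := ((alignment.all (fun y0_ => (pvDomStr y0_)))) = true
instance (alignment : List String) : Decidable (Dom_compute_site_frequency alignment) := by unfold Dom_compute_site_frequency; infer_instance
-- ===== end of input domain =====

-- B replaces A's column-wise transpose-and-count with a single row-wise pass adding 0/1 rows (alternative decomposition, same cost).

-- 'base not in ["-","N","X"]' (used by both Pythons as their membership test)
def pvIsValid (c : Char) : Bool := !(c == '-' || c == 'N' || c == 'X')

-- ===== PORT A =====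
-- zip(*alignment) is ported as an index-based transpose over the minimum row length
-- (exact: zip of k sequences stops at the shortest; zip() of no sequences is empty).
-- A's unused 'seq_count' and 'Counter(col)' are dead code and not ported.
def compute_site_frequency (alignment : List String) : List Int :=
  let rows := alignment.map String.toList
  let ncols := match rows with
    | [] => 0
    | r :: rs => rs.foldl (fun m x => min m x.length) r.length
  let cols := (List.range ncols).map (fun j => rows.map (fun r => r.getD j ' '))
  cols.foldl (fun freqs col => freqs ++ [((col.filter (fun c => pvIsValid c)).length : Int)]) []

-- ===== PORT B =====
-- row of 0/1 validity flags for one sequence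
def pvRowOf (r : List Char) : List Int := r.map (fun c => if pvIsValid c then (1 : Int) else 0)

def compute_site_frequency_alt (alignment : List String) : List Int :=
  let res := alignment.foldl
    (fun acc seq =>
      let row := pvRowOf seq.toList
      match acc with
      | none => some row
      | some cs => some (List.zipWith (· + ·) cs row)) none
  match res with
  | none => []
  | some cs => cs

-- ===== PRECONDITION & SPEC =====
def Spec_compute_site_frequency (alignment : List String) (out : List Int) : Prop := out = compute_site_frequency_alt alignment
instance (alignment : List String) (out : List Int) : Decidable (Spec_compute_site_frequency alignment out) := by unfold Spec_compute_site_frequency; infer_instance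

-- ===== CLAIM (what is proved, stated in full; the proofs are below) =====
def Claim_equal_compute_site_frequency : Prop := ∀ (alignment : List String), Dom_compute_site_frequency alignment → Spec_compute_site_frequency alignment (compute_site_frequency alignment)

-- ===== LEMMAS AND PROOFS =====

-- number of rows whose j-th character is valid
def pvCAt (rows : List (List Char)) (j : Nat) : Int :=
  ((rows.filter (fun r => pvIsValid (r.getD j ' '))).length : Int)

theorem pv_foldl_append (l : List (List Char)) (f : List Char → Int) :
    ∀ acc : List Int, l.foldl (fun a c => a ++ [f c]) acc = acc ++ l.map f := by
  induction l with
  | nil => intro acc; simp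
  | cons x xs ih => intro acc; simp [List.foldl, ih]

theorem pv_foldl_min_le (l : List (List Char)) :
    ∀ m : Nat, l.foldl (fun m x => min m x.length) m ≤ m := by
  induction l with
  | nil => intro m; simp
  | cons x xs ih =>
    intro m
    calc (x :: xs).foldl (fun m x => min m x.length) m
        = xs.foldl (fun m x => min m x.length) (min m x.length) := rfl
      _ ≤ min m x.length := ih _
      _ ≤ m := Nat.min_le_left _ _

theorem pv_rowOf_length (r : List Char) : (pvRowOf r).length = r.length := by
  simp [pvRowOf]

theorem pv_cAt_cons (r : List Char) (rows : List (List Char)) (j : Nat) :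
    pvCAt (r :: rows) j
      = (if pvIsValid (r.getD j ' ') then (1 : Int) else 0) + pvCAt rows j := by
  simp only [pvCAt, List.filter_cons]
  split_ifs with h <;> simp <;> omega

-- the zipWith-accumulating fold, pointwise
theorem pv_fold_zip (rest : List (List Char)) :
    ∀ cs : List Int,
      rest.foldl (fun cs r => List.zipWith (· + ·) cs (pvRowOf r)) cs
        = (List.range (rest.foldl (fun m r => min m r.length) cs.length)).map
            (fun j => cs.getD j 0 + pvCAt rest j) := by
  induction rest with
  | nil =>
    intro cs
    simp only [List.foldl]
    refine List.ext_getElem (by simp) ?_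
    intro j h1 h2
    simp only [List.getElem_map, List.getElem_range]
    have hj : j < cs.length := by simpa using h1
    simp [pvCAt, List.getD_eq_getElem?_getD, List.getElem?_eq_getElem hj]
  | cons r rest ih =>
    intro cs
    have hlen : (List.zipWith (· + ·) cs (pvRowOf r)).length = min cs.length r.length := by
      simp [pv_rowOf_length]
    calc (r :: rest).foldl (fun cs r => List.zipWith (· + ·) cs (pvRowOf r)) cs
        = rest.foldl (fun cs r => List.zipWith (· + ·) cs (pvRowOf r))
            (List.zipWith (· + ·) cs (pvRowOf r)) := rfl
      _ = (List.range (rest.foldl (fun m r => min m r.length)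
              (List.zipWith (· + ·) cs (pvRowOf r)).length)).map
            (fun j => (List.zipWith (· + ·) cs (pvRowOf r)).getD j 0 + pvCAt rest j) := ih _
      _ = _ := by
          rw [hlen]
          refine List.map_congr_left ?_
          intro j hj
          have hjb : j < rest.foldl (fun m r => min m r.length) (min cs.length r.length) := by
            simpa using hj
          have hjm : j < min cs.length r.length :=
            Nat.lt_of_lt_of_le hjb (pv_foldl_min_le _ _)
          have hjc : j < cs.length := Nat.lt_of_lt_of_le hjm (Nat.min_le_left _ _)
          have hjr : j < r.length := Nat.lt_of_lt_of_le hjm (Nat.min_le_right _ _)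
          have hz : j < (List.zipWith (· + ·) cs (pvRowOf r)).length := by
            rw [hlen]; exact hjm
          have h1 : (List.zipWith (· + ·) cs (pvRowOf r)).getD j 0
              = cs.getD j 0 + (if pvIsValid (r.getD j ' ') then (1 : Int) else 0) := by
            rw [List.getD_eq_getElem?_getD, List.getElem?_eq_getElem hz,
                List.getElem_zipWith, List.getD_eq_getElem?_getD,
                List.getElem?_eq_getElem hjc]
            simp [pvRowOf, List.getD_eq_getElem?_getD, List.getElem?_eq_getElem hjr]
          rw [h1, pv_cAt_cons]
          ring

theorem pv_filter_map_len (rows : List (List Char)) (j : Nat) :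
    (((rows.map (fun r => r.getD j ' ')).filter (fun c => pvIsValid c)).length : Int)
      = pvCAt rows j := by
  rw [List.filter_map]
  simp [pvCAt, Function.comp_def]

theorem pv_fold_some (rest : List String) :
    ∀ cs : List Int,
      rest.foldl
        (fun acc seq =>
          match acc with
          | none => some (pvRowOf seq.toList)
          | some cs => some (List.zipWith (· + ·) cs (pvRowOf seq.toList))) (some cs)
        = some ((rest.map String.toList).foldl
            (fun cs r => List.zipWith (· + ·) cs (pvRowOf r)) cs) := by
  induction rest with
  | nil => intro cs; rfl
  | cons t ts ih => intro cs; simpa [List.foldl] using ih _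

-- ===== VERDICT (by name: the statement is the Claim_ definition above) =====
theorem compute_site_frequency_spec : Claim_equal_compute_site_frequency := by
  intro alignment _
  unfold Spec_compute_site_frequency
  cases alignment with
  | nil => rfl
  | cons s rest =>
    simp only [compute_site_frequency, compute_site_frequency_alt, List.map_cons, List.foldl]
    rw [pv_foldl_append, List.nil_append, pv_fold_some, pv_fold_zip, pv_rowOf_length]
    simp only [List.map_map]
    refine Eq.symm (List.map_congr_left ?_)
    intro j hj
    have hjb : j < rest.foldl (fun m x => min m (String.toList x).length) s.toList.length := by
      simpa [List.foldl_map] using hj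
    have hjs : j < s.toList.length := by
      have h := pv_foldl_min_le (rest.map String.toList) s.toList.length
      rw [List.foldl_map] at h
      exact Nat.lt_of_lt_of_le hjb h
    have h1 : (pvRowOf s.toList).getD j 0
        = (if pvIsValid (s.toList.getD j ' ') then (1 : Int) else 0) := by
      have hz : j < (pvRowOf s.toList).length := by rw [pv_rowOf_length]; exact hjs
      rw [List.getD_eq_getElem?_getD, List.getElem?_eq_getElem hz]
      simp [pvRowOf, List.getD_eq_getElem?_getD, List.getElem?_eq_getElem hjs]
    simp only [Function.comp_apply, ← List.map_map]
    rw [h1, List.filter_cons]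
    split_ifs with hv
    · rw [List.length_cons]; push_cast; rw [pv_filter_map_len]; ring
    · rw [pv_filter_map_len]; ring
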